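-- pv_equiv track=rewrite | github.com/mayosupport/Advent-Of-Code | 2024/day9/pt2.py | find_leftmost_space
-- ===== SOURCE A (Python) =====
-- def find_leftmost_space(blocks, required_length, start_pos=0):
--     current_length = 0
--     start_of_space = None
--
--     # Get furthest left position with enough empty spaces
--     for pos in range(start_pos, len(blocks)):
--         if blocks[pos] == '.':
--             if start_of_space is None:
--                 start_of_space = pos
--             current_length += 1
--             if current_length >= required_length:
--                 return start_of_space
--         else:
--             current_length = 0
--             start_of_space = None
--
--     return None
-- ===== SOURCE B (Python) =====
-- def find_leftmost_space(blocks, required_length, start_pos=0):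
--     # Run-based scan: jump over each maximal run of '.' instead of keeping counters.
--     n = len(blocks)
--     i = max(start_pos, 0)
--     while i < n:
--         if blocks[i] == '.':
--             j = i + 1
--             while j < n and blocks[j] == '.':
--                 j += 1
--             if j - i >= required_length:
--                 return i
--             i = j
--         else:
--             i += 1
--     return None
-- ===== Notes on version B (the rewrite author's own statement) =====
-- stated objective: alternative
-- what changed: Replaced A's stateful single scan (current_length / start_of_space counters updated at every index) by a run-decomposition: an outer loop that jumps to each maximal run of '.' and an inner loop that measures the run, returning its start if long enough.
-- outside the precondition, e.g. on find_leftmost_space(['x', '.'], 1, -1): A returns -1, B returns 1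
import Mathlib
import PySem

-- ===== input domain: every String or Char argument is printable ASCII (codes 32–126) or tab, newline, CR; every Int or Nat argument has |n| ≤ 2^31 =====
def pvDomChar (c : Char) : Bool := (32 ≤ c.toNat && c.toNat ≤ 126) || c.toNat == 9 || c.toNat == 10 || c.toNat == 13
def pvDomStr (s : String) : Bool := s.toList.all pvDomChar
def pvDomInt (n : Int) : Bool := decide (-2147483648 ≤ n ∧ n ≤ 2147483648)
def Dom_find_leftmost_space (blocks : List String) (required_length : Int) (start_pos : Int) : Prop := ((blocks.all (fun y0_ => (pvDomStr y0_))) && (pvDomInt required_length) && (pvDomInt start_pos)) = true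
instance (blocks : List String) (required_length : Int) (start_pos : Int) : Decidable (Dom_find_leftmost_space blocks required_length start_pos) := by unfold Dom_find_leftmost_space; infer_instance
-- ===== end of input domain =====

-- B replaces A's stateful counter scan by a run-decomposition scan (alternative structure, same O(n) cost); return-value equivalence proved for start_pos ≥ 0.

-- ===== PORT A =====
-- the 'for pos in range(start_pos, len(blocks))' loop, state = (current_length, start_of_space)
def find_leftmost_space_go (blocks : List String) (required_length : Int) :
    List Int → Int → Option Int → Option Int
  | [], _, _ => none
  | pos :: rest, current_length, start_of_space =>
    if PySem.List.pyGet? blocks pos = some "." then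
      let s := start_of_space.getD pos          -- if start_of_space is None: start_of_space = pos
      let c := current_length + 1               -- current_length += 1
      if required_length ≤ c then some s        -- if current_length >= required_length: return start_of_space
      else find_leftmost_space_go blocks required_length rest c (some s)
    else find_leftmost_space_go blocks required_length rest 0 none

def find_leftmost_space (blocks : List String) (required_length : Int) (start_pos : Int) : Option Int :=
  find_leftmost_space_go blocks required_length
    (PySem.List.pyRange start_pos (blocks.length : Int) 1) 0 none

-- ===== PORT B =====
-- inner while loop of Source B: advance j over the run of '.'; fuel = remaining distance to n (totality guard only)
def altRunEnd (blocks : List String) (n : Int) : Nat → Int → Int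
  | 0, j => j
  | fuel + 1, j =>
    if j < n ∧ PySem.List.pyGet? blocks j = some "." then
      altRunEnd blocks n fuel (j + 1)
    else j

-- outer while loop of Source B; fuel = remaining distance to n (totality guard only)
def altGo (blocks : List String) (required_length : Int) (n : Int) : Nat → Int → Option Int
  | 0, _ => none
  | fuel + 1, i =>
    if i < n then
      if PySem.List.pyGet? blocks i = some "." then
        let j := altRunEnd blocks n (n - (i + 1)).toNat (i + 1)
        if required_length ≤ j - i then some i
        else altGo blocks required_length n fuel j
      else altGo blocks required_length n fuel (i + 1)
    else none

def find_leftmost_space_alt (blocks : List String) (required_length : Int) (start_pos : Int) : Option Int :=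
  altGo blocks required_length (blocks.length : Int)
    ((blocks.length : Int) - max start_pos 0).toNat (max start_pos 0)

-- ===== PRECONDITION & SPEC =====
-- Pre_ excludes negative start_pos: there A either raises IndexError (start_pos < -len) or scans
-- via Python's accidental negative-index wraparound, returning negative positions no caller would
-- specify; B's clamp-to-0 value there is equally arbitrary, so the corner is excluded.
def Pre_find_leftmost_space (blocks : List String) (required_length : Int) (start_pos : Int) : Prop :=
  0 ≤ start_pos
instance (blocks : List String) (required_length : Int) (start_pos : Int) : Decidable (Pre_find_leftmost_space blocks required_length start_pos) := by unfold Pre_find_leftmost_space; infer_instance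

def pvWitness_find_leftmost_space : List String × Int × Int := (["."], 1, 0)

def Spec_find_leftmost_space (blocks : List String) (required_length : Int) (start_pos : Int) (out : Option Int) : Prop := out = find_leftmost_space_alt blocks required_length start_pos
instance (blocks : List String) (required_length : Int) (start_pos : Int) (out : Option Int) : Decidable (Spec_find_leftmost_space blocks required_length start_pos out) := by unfold Spec_find_leftmost_space; infer_instance

-- ===== CLAIM (what is proved, stated in full; the proofs are below) =====
def Claim_equal_find_leftmost_space : Prop := ∀ (blocks : List String) (required_length : Int) (start_pos : Int), Dom_find_leftmost_space blocks required_length start_pos → Pre_find_leftmost_space blocks required_length start_pos → Spec_find_leftmost_space blocks required_length start_pos (find_leftmost_space blocks required_length start_pos)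

-- ===== LEMMAS AND PROOFS =====

theorem altRunEnd_ge (blocks : List String) (n : Int) (fuel : Nat) (j : Int) :
    j ≤ altRunEnd blocks n fuel j := by
  induction fuel generalizing j with
  | zero => simp [altRunEnd]
  | succ k ih =>
    rw [altRunEnd]
    split
    · have := ih (j + 1); omega
    · omega

theorem altRunEnd_stop (blocks : List String) (n : Int) (fuel : Nat) (j : Int)
    (hf : (n - j).toNat ≤ fuel) :
    ¬ (altRunEnd blocks n fuel j < n ∧
       PySem.List.pyGet? blocks (altRunEnd blocks n fuel j) = some ".") := by
  induction fuel generalizing j with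
  | zero =>
    have : ¬ j < n := by omega
    simp [altRunEnd, this]
  | succ k ih =>
    rw [altRunEnd]
    split
    · exact ih (j + 1) (by omega)
    · assumption

theorem altRunEnd_stuck (blocks : List String) (n : Int) (fuel : Nat) (j : Int)
    (h : ¬ (j < n ∧ PySem.List.pyGet? blocks j = some ".")) :
    altRunEnd blocks n fuel j = j := by
  cases fuel <;> simp [altRunEnd, h]

theorem altRunEnd_succ (blocks : List String) (n : Int) (j : Int)
    (h : j < n ∧ PySem.List.pyGet? blocks j = some ".") :
    altRunEnd blocks n (n - j).toNat j = altRunEnd blocks n (n - (j + 1)).toNat (j + 1) := by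
  have hk : (n - j).toNat = (n - (j + 1)).toNat + 1 := by omega
  rw [hk, altRunEnd, if_pos h]

-- altGo is fuel-insensitive once the fuel covers the remaining distance
theorem altGo_fuel (blocks : List String) (req n : Int) (f1 f2 : Nat) (i : Int)
    (h1 : (n - i).toNat ≤ f1) (h2 : (n - i).toNat ≤ f2) :
    altGo blocks req n f1 i = altGo blocks req n f2 i := by
  induction f1 generalizing f2 i with
  | zero =>
    have hn : ¬ i < n := by omega
    cases f2 <;> simp [altGo, hn]
  | succ k1 ih =>
    cases f2 with
    | zero =>
      have hn : ¬ i < n := by omega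
      simp [altGo, hn]
    | succ k2 =>
      rw [altGo, altGo]
      by_cases hn : i < n
      · rw [if_pos hn, if_pos hn]
        by_cases hd : PySem.List.pyGet? blocks i = some "."
        · rw [if_pos hd, if_pos hd]
          have hge := altRunEnd_ge blocks n (n - (i + 1)).toNat (i + 1)
          show (if req ≤ altRunEnd blocks n (n - (i + 1)).toNat (i + 1) - i then some i else altGo blocks req n k1 (altRunEnd blocks n (n - (i + 1)).toNat (i + 1)))
             = (if req ≤ altRunEnd blocks n (n - (i + 1)).toNat (i + 1) - i then some i else altGo blocks req n k2 (altRunEnd blocks n (n - (i + 1)).toNat (i + 1)))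
          split
          · rfl
          · exact ih k2 (altRunEnd blocks n (n - (i + 1)).toNat (i + 1)) (by omega) (by omega)
        · rw [if_neg hd, if_neg hd]
          exact ih k2 (i + 1) (by omega) (by omega)
      · rw [if_neg hn, if_neg hn]

-- one-step unfolding of altGo at its exact fuel
theorem altGo_eq (blocks : List String) (req n i : Int) :
    altGo blocks req n (n - i).toNat i =
      (if i < n then
        (if PySem.List.pyGet? blocks i = some "." then
          (if req ≤ altRunEnd blocks n (n - (i + 1)).toNat (i + 1) - i
           then some i
           else altGo blocks req n
             (n - altRunEnd blocks n (n - (i + 1)).toNat (i + 1)).toNat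
             (altRunEnd blocks n (n - (i + 1)).toNat (i + 1)))
         else altGo blocks req n (n - (i + 1)).toNat (i + 1))
       else none) := by
  by_cases hn : i < n
  · have hk : (n - i).toNat = ((n - i).toNat - 1) + 1 := by omega
    rw [if_pos hn, hk, altGo, if_pos hn]
    by_cases hd : PySem.List.pyGet? blocks i = some "."
    · rw [if_pos hd, if_pos hd]
      have hge := altRunEnd_ge blocks n (n - (i + 1)).toNat (i + 1)
      show (if req ≤ altRunEnd blocks n (n - (i + 1)).toNat (i + 1) - i then some i else altGo blocks req n ((n - i).toNat - 1) (altRunEnd blocks n (n - (i + 1)).toNat (i + 1)))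
         = (if req ≤ altRunEnd blocks n (n - (i + 1)).toNat (i + 1) - i then some i else altGo blocks req n (n - altRunEnd blocks n (n - (i + 1)).toNat (i + 1)).toNat (altRunEnd blocks n (n - (i + 1)).toNat (i + 1)))
      split
      · rfl
      · exact altGo_fuel blocks req n ((n - i).toNat - 1) (n - altRunEnd blocks n (n - (i + 1)).toNat (i + 1)).toNat (altRunEnd blocks n (n - (i + 1)).toNat (i + 1)) (by omega) (le_refl _)
    · rw [if_neg hd, if_neg hd]
      exact altGo_fuel blocks req n ((n - i).toNat - 1) (n - (i + 1)).toNat (i + 1) (by omega) (le_refl _)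
  · have hk : (n - i).toNat = 0 := by omega
    rw [hk, altGo, if_neg hn]

-- A's scan across one maximal run of dots: it returns the run's recorded start as soon as the
-- counter reaches required_length, otherwise leaves the run with the counter increased by its length.
theorem go_run (blocks : List String) (req i c : Int) (s : Option Int)
    (h0 : 0 ≤ i) (hi : i < (blocks.length : Int))
    (hd : PySem.List.pyGet? blocks i = some ".") :
    find_leftmost_space_go blocks req (PySem.List.pyRange i (blocks.length : Int) 1) c s =
      (if req ≤ c + (altRunEnd blocks (blocks.length : Int) ((blocks.length : Int) - (i + 1)).toNat (i + 1) - i) then some (s.getD i)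
       else find_leftmost_space_go blocks req
         (PySem.List.pyRange (altRunEnd blocks (blocks.length : Int) ((blocks.length : Int) - (i + 1)).toNat (i + 1)) (blocks.length : Int) 1)
         (c + (altRunEnd blocks (blocks.length : Int) ((blocks.length : Int) - (i + 1)).toNat (i + 1) - i)) (some (s.getD i))) := by
  have hj1 : i + 1 ≤ altRunEnd blocks (blocks.length : Int) ((blocks.length : Int) - (i + 1)).toNat (i + 1) :=
    altRunEnd_ge blocks _ _ (i + 1)
  rw [PySem.List.pyRange_one_cons hi]
  rw [find_leftmost_space_go]
  rw [if_pos hd]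
  by_cases hreq : req ≤ c + 1
  · rw [if_pos hreq, if_pos (by omega)]
  · rw [if_neg hreq]
    by_cases hnext : (i + 1 < (blocks.length : Int) ∧ PySem.List.pyGet? blocks (i + 1) = some ".")
    · have hrec := go_run blocks req (i + 1) (c + 1) (some (s.getD i)) (by omega) hnext.1 hnext.2
      rw [altRunEnd_succ blocks _ (i + 1) hnext]
      simp only [Option.getD_some] at hrec
      rw [hrec]
      have : c + 1 + (altRunEnd blocks (blocks.length : Int) ((blocks.length : Int) - (i + 1 + 1)).toNat (i + 1 + 1) - (i + 1))
           = c + (altRunEnd blocks (blocks.length : Int) ((blocks.length : Int) - (i + 1 + 1)).toNat (i + 1 + 1) - i) := by omega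
      rw [this]
    · rw [altRunEnd_stuck blocks _ _ (i + 1) hnext]
      rw [if_neg (by omega)]
      have : c + (i + 1 - i) = c + 1 := by omega
      rw [this]
termination_by ((blocks.length : Int) - i).toNat
decreasing_by omega

-- Main invariant: from any nonnegative position, A's fresh scan equals B's run scan at exact fuel.
theorem go_eq_altGo (blocks : List String) (req i : Int) (h0 : 0 ≤ i) :
    find_leftmost_space_go blocks req (PySem.List.pyRange i (blocks.length : Int) 1) 0 none =
      altGo blocks req (blocks.length : Int) ((blocks.length : Int) - i).toNat i := by
  rw [altGo_eq]
  by_cases hi : i < (blocks.length : Int)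
  · by_cases hd : PySem.List.pyGet? blocks i = some "."
    · have hj1 : i + 1 ≤ altRunEnd blocks (blocks.length : Int) ((blocks.length : Int) - (i + 1)).toNat (i + 1) :=
        altRunEnd_ge blocks _ _ (i + 1)
      rw [go_run blocks req i 0 none h0 hi hd]
      rw [if_pos hi, if_pos hd]
      simp only [Option.getD_none, zero_add]
      by_cases hreq : req ≤ altRunEnd blocks (blocks.length : Int) ((blocks.length : Int) - (i + 1)).toNat (i + 1) - i
      · rw [if_pos hreq, if_pos hreq]
      · rw [if_neg hreq, if_neg hreq]
        set j := altRunEnd blocks (blocks.length : Int) ((blocks.length : Int) - (i + 1)).toNat (i + 1) with hjdef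
        have hstop := altRunEnd_stop blocks (blocks.length : Int) ((blocks.length : Int) - (i + 1)).toNat (i + 1) (le_refl _)
        by_cases hjlt : j < (blocks.length : Int)
        · have hjd : ¬ PySem.List.pyGet? blocks j = some "." := fun hc => hstop ⟨hjlt, hc⟩
          rw [PySem.List.pyRange_one_cons hjlt]
          rw [find_leftmost_space_go]
          rw [if_neg hjd]
          rw [go_eq_altGo blocks req (j + 1) (by omega)]
          conv_rhs => rw [altGo_eq]
          rw [if_pos hjlt, if_neg hjd]
        · rw [PySem.List.pyRange_one_eq_nil (by omega)]
          rw [find_leftmost_space_go]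
          conv_rhs => rw [altGo_eq]
          rw [if_neg hjlt]
    · rw [PySem.List.pyRange_one_cons hi]
      rw [find_leftmost_space_go]
      rw [if_neg hd]
      rw [go_eq_altGo blocks req (i + 1) (by omega)]
      rw [if_pos hi, if_neg hd]
  · rw [PySem.List.pyRange_one_eq_nil (by omega)]
    rw [find_leftmost_space_go]
    rw [if_neg hi]
termination_by ((blocks.length : Int) - i).toNat
decreasing_by all_goals omega

-- ===== VERDICT (by name: the statement is the Claim_ definition above) =====
theorem find_leftmost_space_spec : Claim_equal_find_leftmost_space := by
  intro blocks required_length start_pos _ hpre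
  unfold Spec_find_leftmost_space find_leftmost_space find_leftmost_space_alt
  have hmax : max start_pos 0 = start_pos := by
    unfold Pre_find_leftmost_space at hpre; omega
  rw [hmax]
  exact go_eq_altGo blocks required_length start_pos hpre
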